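-- pv_equiv track=rewrite | github.com/rishabhcli/ReFind | backend/venv/Lib/site-packages/railtracks/built_nodes/concrete/rag.py | _random_contiguous_subsequence
-- ===== SOURCE A (Python) =====
-- def _random_contiguous_subsequence(seq: list[tuple[str, str]]):
--     """
--     Generates all possible contiguous subsequences from a list of message pairs,
--     flattening each subsequence into a single string.
--
--     Example:
--         Input:
--             [(U1, A1), (U2, A2)]
--         Output:
--             [
--                 "U1\nA1",
--                 "U1\nA1\nU2\nA2",
--                 "U2\nA2"
--             ]
--
--     Args:
--         seq (list[tuple[str, str]]):
--             List of (user_text, assistant_text) pairs.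
--
--     Returns:
--         list[str]:
--             Every possible contiguous combination of messages, each as one string.
--     """
--     new_seq: list[str] = []
--     for i in range(len(seq)):
--         for j in range(i, len(seq)):
--             texts = []
--             for idx in range(i, j + 1):
--                 texts.append(seq[idx][0])
--                 texts.append(seq[idx][1])
--             new_seq.append("\n".join(texts))
--
--     return new_seq
-- ===== SOURCE B (Python) =====
-- def _random_contiguous_subsequence(seq: list[tuple[str, str]]):
--     # For each start i, keep one running string and extend it per end index,
--     # instead of re-collecting and re-joining the whole window for every (i, j).
--     new_seq: list[str] = []
--     for i in range(len(seq)):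
--         cur = seq[i][0] + "\n" + seq[i][1]
--         new_seq.append(cur)
--         for j in range(i + 1, len(seq)):
--             cur = cur + "\n" + seq[j][0] + "\n" + seq[j][1]
--             new_seq.append(cur)
--     return new_seq
-- ===== Notes on version B (the rewrite author's own statement) =====
-- stated objective: alternative
-- what changed: Replaces the innermost rebuild loop (re-collecting and re-joining every window from scratch for each (i,j)) with a single running string per start index that is extended incrementally, so each output string is produced by one concatenation step from the previous one.
import Mathlib
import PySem

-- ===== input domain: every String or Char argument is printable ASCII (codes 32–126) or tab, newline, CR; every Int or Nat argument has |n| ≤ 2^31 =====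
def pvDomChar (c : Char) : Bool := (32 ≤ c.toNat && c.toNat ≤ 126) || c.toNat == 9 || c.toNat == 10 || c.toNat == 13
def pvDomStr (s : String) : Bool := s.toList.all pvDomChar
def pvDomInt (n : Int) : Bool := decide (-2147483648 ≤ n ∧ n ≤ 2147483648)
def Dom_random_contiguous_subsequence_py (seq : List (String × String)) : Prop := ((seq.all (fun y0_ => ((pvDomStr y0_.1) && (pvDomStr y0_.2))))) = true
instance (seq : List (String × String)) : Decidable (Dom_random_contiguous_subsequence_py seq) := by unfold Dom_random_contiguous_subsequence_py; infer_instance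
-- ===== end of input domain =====

-- B replaces A's innermost rebuild-and-rejoin loop by one running string per start
-- index that is extended incrementally (objective: alternative decomposition;
-- the same output list is produced by maintaining accumulated state).

-- ===== PORT A =====
def random_contiguous_subsequence_py (seq : List (String × String)) : List String :=
  (PySem.List.pyRange 0 (seq.length : Int)).foldl (fun new_seq i =>
    (PySem.List.pyRange i (seq.length : Int)).foldl (fun new_seq j =>
      let texts : List String :=
        (PySem.List.pyRange i (j + 1)).foldl (fun texts idx =>
          texts ++ [(PySem.List.pyGetD seq idx ("", "")).1]
                ++ [(PySem.List.pyGetD seq idx ("", "")).2]) []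
      new_seq ++ [PySem.Str.join "\n" texts]) new_seq) []

-- ===== PORT B =====
def random_contiguous_subsequence_py_alt (seq : List (String × String)) : List String :=
  (PySem.List.pyRange 0 (seq.length : Int)).foldl (fun new_seq i =>
    let cur0 : String :=
      (PySem.List.pyGetD seq i ("", "")).1 ++ "\n" ++ (PySem.List.pyGetD seq i ("", "")).2
    ((PySem.List.pyRange (i + 1) (seq.length : Int)).foldl (fun st j =>
      let cur : String :=
        st.1 ++ "\n" ++ (PySem.List.pyGetD seq j ("", "")).1
             ++ "\n" ++ (PySem.List.pyGetD seq j ("", "")).2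
      (cur, st.2 ++ [cur])) (cur0, new_seq ++ [cur0])).2) []

-- ===== PRECONDITION & SPEC =====
def Spec_random_contiguous_subsequence_py (seq : List (String × String)) (out : List String) : Prop := out = random_contiguous_subsequence_py_alt seq
instance (seq : List (String × String)) (out : List String) : Decidable (Spec_random_contiguous_subsequence_py seq out) := by unfold Spec_random_contiguous_subsequence_py; infer_instance

-- ===== CLAIM (what is proved, stated in full; the proofs are below) =====
def Claim_equal_random_contiguous_subsequence_py : Prop := ∀ (seq : List (String × String)), Dom_random_contiguous_subsequence_py seq → Spec_random_contiguous_subsequence_py seq (random_contiguous_subsequence_py seq)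

-- ===== LEMMAS AND PROOFS =====

-- join of a window, the value A appends for the pair (i, j)
def pvFA (seq : List (String × String)) (i j : Int) : String :=
  PySem.Str.join "\n" ((PySem.List.pyRange i (j + 1)).flatMap
    (fun idx => [(PySem.List.pyGetD seq idx ("", "")).1, (PySem.List.pyGetD seq idx ("", "")).2]))

lemma pvRange_empty {a b : Int} (h : b ≤ a) : PySem.List.pyRange a b = [] := by
  simp [PySem.List.pyRange]; omega

lemma chars_join_append (sep x : List Char) (l : List (List Char)) (h : l ≠ []) :
    PySem.Chars.join sep (l ++ [x]) = PySem.Chars.join sep l ++ sep ++ x := by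
  induction l with
  | nil => exact absurd rfl h
  | cons p rest ih =>
    cases rest with
    | nil => simp [PySem.Chars.join_cons_cons, PySem.Chars.join_singleton]
    | cons q rest' =>
      have := ih (by simp)
      simp only [List.cons_append, PySem.Chars.join_cons_cons] at *
      simp [this]

lemma str_join_pair (u a : String) : PySem.Str.join "\n" [u, a] = u ++ "\n" ++ a := by
  apply String.toList_inj.mp
  simp [PySem.Str.toList_join, PySem.Chars.join_cons_cons, PySem.Chars.join_singleton]

lemma str_join_append2 (l : List String) (h : l ≠ []) (u a : String) :
    PySem.Str.join "\n" (l ++ [u, a]) = PySem.Str.join "\n" l ++ "\n" ++ u ++ "\n" ++ a := by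
  apply String.toList_inj.mp
  have h1 : (l.map String.toList) ≠ [] := by simpa using h
  have e : l ++ [u, a] = (l ++ [u]) ++ [a] := by simp
  rw [e]
  simp only [PySem.Str.toList_join, List.map_append, List.map_cons, List.map_nil,
    String.toList_append]
  rw [chars_join_append _ _ _ (by simp), chars_join_append _ _ _ h1]

lemma pvFA_base (seq : List (String × String)) (i : Int) :
    pvFA seq i i = (PySem.List.pyGetD seq i ("", "")).1 ++ "\n" ++ (PySem.List.pyGetD seq i ("", "")).2 := by
  have h1 : PySem.List.pyRange i (i + 1) = i :: PySem.List.pyRange (i + 1) (i + 1) :=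
    PySem.List.pyRange_one_cons (by omega)
  have h2 : PySem.List.pyRange (i + 1) (i + 1) = ([] : List Int) := pvRange_empty le_rfl
  rw [pvFA, h1, h2]
  simp [str_join_pair]

lemma pvFA_nonempty_interval (seq : List (String × String)) (i j : Int) (h : i ≤ j) :
    (PySem.List.pyRange i (j + 1)).flatMap
      (fun idx => [(PySem.List.pyGetD seq idx ("", "")).1, (PySem.List.pyGetD seq idx ("", "")).2]) ≠ [] := by
  rw [PySem.List.pyRange_one_cons (by omega)]
  simp

lemma pvFA_step (seq : List (String × String)) (i j : Int) (h : i ≤ j) :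
    pvFA seq i (j + 1) = pvFA seq i j ++ "\n"
      ++ (PySem.List.pyGetD seq (j + 1) ("", "")).1 ++ "\n"
      ++ (PySem.List.pyGetD seq (j + 1) ("", "")).2 := by
  rw [pvFA, pvFA, PySem.List.pyRange_one_succ_right (by omega : i ≤ j + 1)]
  rw [List.flatMap_append]
  simp only [List.flatMap_cons, List.flatMap_nil, List.append_nil]
  exact str_join_append2 _ (pvFA_nonempty_interval seq i j h) _ _

lemma texts_eq (seq : List (String × String)) (i j : Int) :
    (PySem.List.pyRange i (j + 1)).foldl (fun texts idx =>
        texts ++ [(PySem.List.pyGetD seq idx ("", "")).1]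
              ++ [(PySem.List.pyGetD seq idx ("", "")).2]) []
      = (PySem.List.pyRange i (j + 1)).flatMap
          (fun idx => [(PySem.List.pyGetD seq idx ("", "")).1, (PySem.List.pyGetD seq idx ("", "")).2]) := by
  rw [← List.nil_append (List.flatMap
      (fun idx => [(PySem.List.pyGetD seq idx ("", "")).1, (PySem.List.pyGetD seq idx ("", "")).2])
      (PySem.List.pyRange i (j + 1))),
    ← PySem.List.foldl_append_eq_flatMap]
  apply PySem.List.foldl_congr_mem
  intro acc x _
  simp

lemma innerB (seq : List (String × String)) (i : Int) :
    ∀ (m : Nat) (k : Int) (acc : List String), i ≤ k → (seq.length : Int) ≤ k + m →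
    ((PySem.List.pyRange (k + 1) (seq.length : Int)).foldl (fun st j =>
        let cur : String :=
          st.1 ++ "\n" ++ (PySem.List.pyGetD seq j ("", "")).1
               ++ "\n" ++ (PySem.List.pyGetD seq j ("", "")).2
        (cur, st.2 ++ [cur])) (pvFA seq i k, acc)).2
      = acc ++ (PySem.List.pyRange (k + 1) (seq.length : Int)).map (pvFA seq i) := by
  intro m
  induction m with
  | zero =>
    intro k acc _ hlen
    rw [pvRange_empty (by omega)]
    simp
  | succ m' ih =>
    intro k acc hik hlen
    by_cases h : k + 1 < (seq.length : Int)
    · rw [PySem.List.pyRange_one_cons h]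
      simp only [List.foldl_cons, List.map_cons]
      have hcur : pvFA seq i k ++ "\n" ++ (PySem.List.pyGetD seq (k + 1) ("", "")).1
               ++ "\n" ++ (PySem.List.pyGetD seq (k + 1) ("", "")).2 = pvFA seq i (k + 1) :=
        (pvFA_step seq i k hik).symm
      simp only [hcur]
      have := ih (k + 1) (acc ++ [pvFA seq i (k + 1)]) (by omega) (by omega)
      rw [this]
      simp
    · rw [pvRange_empty (by omega)]
      simp

lemma outer_body_eq (seq : List (String × String)) (acc : List String) (i : Int)
    (h0 : 0 ≤ i) (hlt : i < (seq.length : Int)) :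
    (PySem.List.pyRange i (seq.length : Int)).foldl (fun new_seq j =>
      let texts : List String :=
        (PySem.List.pyRange i (j + 1)).foldl (fun texts idx =>
          texts ++ [(PySem.List.pyGetD seq idx ("", "")).1]
                ++ [(PySem.List.pyGetD seq idx ("", "")).2]) []
      new_seq ++ [PySem.Str.join "\n" texts]) acc
    = (let cur0 : String :=
        (PySem.List.pyGetD seq i ("", "")).1 ++ "\n" ++ (PySem.List.pyGetD seq i ("", "")).2
      ((PySem.List.pyRange (i + 1) (seq.length : Int)).foldl (fun st j =>
        let cur : String :=
          st.1 ++ "\n" ++ (PySem.List.pyGetD seq j ("", "")).1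
               ++ "\n" ++ (PySem.List.pyGetD seq j ("", "")).2
        (cur, st.2 ++ [cur])) (cur0, acc ++ [cur0])).2) := by
  -- A side: list of joins = map pvFA
  have hA : (PySem.List.pyRange i (seq.length : Int)).foldl (fun new_seq j =>
      let texts : List String :=
        (PySem.List.pyRange i (j + 1)).foldl (fun texts idx =>
          texts ++ [(PySem.List.pyGetD seq idx ("", "")).1]
                ++ [(PySem.List.pyGetD seq idx ("", "")).2]) []
      new_seq ++ [PySem.Str.join "\n" texts]) acc
      = acc ++ (PySem.List.pyRange i (seq.length : Int)).map (pvFA seq i) := by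
    have : ∀ (a : List String), ∀ j ∈ PySem.List.pyRange i (seq.length : Int),
        (let texts : List String :=
          (PySem.List.pyRange i (j + 1)).foldl (fun texts idx =>
            texts ++ [(PySem.List.pyGetD seq idx ("", "")).1]
                  ++ [(PySem.List.pyGetD seq idx ("", "")).2]) []
         a ++ [PySem.Str.join "\n" texts]) = a ++ [pvFA seq i j] := by
      intro a j _
      simp only [texts_eq, pvFA]
    rw [PySem.List.foldl_congr_mem _ _ _ _ this]
    exact PySem.List.foldl_append_singleton_eq_map (pvFA seq i) _ acc
  -- B side
  have hcur0 : (PySem.List.pyGetD seq i ("", "")).1 ++ "\n" ++ (PySem.List.pyGetD seq i ("", "")).2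
      = pvFA seq i i := (pvFA_base seq i).symm
  rw [hA]
  simp only [hcur0]
  rw [innerB seq i seq.length i (acc ++ [pvFA seq i i]) le_rfl (by omega)]
  rw [PySem.List.pyRange_one_cons hlt, List.map_cons]
  simp

-- ===== VERDICT (by name: the statement is the Claim_ definition above) =====
theorem random_contiguous_subsequence_py_spec : Claim_equal_random_contiguous_subsequence_py := by
  intro seq _
  unfold Spec_random_contiguous_subsequence_py
  unfold random_contiguous_subsequence_py random_contiguous_subsequence_py_alt
  apply PySem.List.foldl_congr_mem
  intro acc i hi
  rw [PySem.List.mem_pyRange_one] at hi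
  exact outer_body_eq seq acc i hi.1 hi.2
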